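-- pv_equiv track=rewrite | github.com/nthakuruk/PythonAssignment | thakur.py | formattedoutput
-- ===== SOURCE A (Python) =====
-- def formattedoutput(tempabbrs):
--
--     output = []
--     for name, abbrdict in tempabbrs:
--
--         output.append(name)
--
--         if len(abbrdict) == 0:
--             output.append(" ")
--         else:
--             sorteddict = dict(sorted(abbrdict.items(),key=lambda x:x[1]))
--             sortedkeys = list(sorteddict.keys())
--             output.append(sortedkeys[0])
--     return output
-- ===== SOURCE B (Python) =====
-- def formattedoutput(tempabbrs):
--     output = []
--     for name, abbrdict in tempabbrs:
--         output.append(name)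
--         best_key = None
--         best_val = None
--         for k, v in abbrdict.items():
--             if best_key is None or v < best_val:
--                 best_key, best_val = k, v
--         output.append(" " if best_key is None else best_key)
--     return output
-- ===== Notes on version B (the rewrite author's own statement) =====
-- stated objective: faster
-- what changed: Replaces sorting the dict items and rebuilding a dict just to read the first key with a single linear first-strict-minimum scan over the items.
import Mathlib
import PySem

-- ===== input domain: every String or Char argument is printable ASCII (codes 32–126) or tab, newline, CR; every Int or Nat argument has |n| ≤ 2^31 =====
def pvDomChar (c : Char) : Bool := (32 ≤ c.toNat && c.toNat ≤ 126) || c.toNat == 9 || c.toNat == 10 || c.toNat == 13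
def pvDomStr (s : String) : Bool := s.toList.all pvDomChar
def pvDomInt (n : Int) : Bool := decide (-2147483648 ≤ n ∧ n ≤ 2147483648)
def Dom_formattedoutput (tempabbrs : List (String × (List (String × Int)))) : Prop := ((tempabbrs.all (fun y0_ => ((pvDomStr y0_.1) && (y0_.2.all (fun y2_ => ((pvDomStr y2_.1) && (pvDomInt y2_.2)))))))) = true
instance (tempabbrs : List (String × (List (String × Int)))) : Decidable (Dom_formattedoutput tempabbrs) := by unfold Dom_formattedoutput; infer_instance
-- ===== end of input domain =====

-- B replaces sorting the dict items (and rebuilding a dict to read its first key)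
-- with a single linear first-strict-minimum scan over the items; simpler, same result.


-- ===== PORT A =====
-- the dict parameter arrives as an association list; it is materialised as a PySem.Dict
def formattedoutput (tempabbrs : List (String × (List (String × Int)))) : List String :=
  tempabbrs.foldl
    (fun output p =>
      let name := p.1
      let abbrdict := PySem.Dict.ofList p.2
      let output := output ++ [name]
      if abbrdict.size = 0 then
        output ++ [" "]
      else
        let sorteddict := PySem.Dict.ofList (PySem.List.sorted abbrdict.items (fun x => x.2) false)
        let sortedkeys := sorteddict.keys
        output ++ [PySem.List.pyGetD sortedkeys 0 ""])   -- sortedkeys[0]; in range since the dict is nonempty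
    []

-- ===== PORT B =====
def formattedoutput_alt (tempabbrs : List (String × (List (String × Int)))) : List String :=
  tempabbrs.foldl
    (fun output p =>
      let name := p.1
      let abbrdict := PySem.Dict.ofList p.2
      let output := output ++ [name]
      let best := abbrdict.items.foldl
        (fun acc kv =>
          match acc with
          | none => some kv
          | some b => if kv.2 < b.2 then some kv else some b)
        (none : Option (String × Int))
      match best with
      | none => output ++ [" "]
      | some b => output ++ [b.1])
    []

-- ===== PRECONDITION & SPEC =====
def Spec_formattedoutput (tempabbrs : List (String × (List (String × Int)))) (out : List String) : Prop := out = formattedoutput_alt tempabbrs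
instance (tempabbrs : List (String × (List (String × Int)))) (out : List String) : Decidable (Spec_formattedoutput tempabbrs out) := by unfold Spec_formattedoutput; infer_instance

-- ===== CLAIM (what is proved, stated in full; the proofs are below) =====
def Claim_equal_formattedoutput : Prop := ∀ (tempabbrs : List (String × (List (String × Int)))), Dom_formattedoutput tempabbrs → Spec_formattedoutput tempabbrs (formattedoutput tempabbrs)

-- ===== LEMMAS AND PROOFS =====

-- head of one stable insertion step
theorem head?_insertBy {α : Type} (bef : α → α → Bool) (x : α) (ys : List α) :
    (PySem.List.insertBy bef x ys).head? =
      some (match ys with | [] => x | y :: _ => if bef x y then x else y) := by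
  cases ys with
  | nil => rfl
  | cons y ys => simp only [PySem.List.insertBy]; split <;> rfl

-- head of the whole insertion-sort fold is the first-strict-minimum scan
theorem head?_foldl_insertBy {α : Type} (bef : α → α → Bool) (l : List α) (acc : List α) :
    (l.foldl (fun acc x => PySem.List.insertBy bef x acc) acc).head? =
      l.foldl
        (fun h x =>
          match h with
          | none => some x
          | some m => if bef x m then some x else some m)
        acc.head? := by
  induction l generalizing acc with
  | nil => rfl
  | cons x l ih =>
      simp only [List.foldl_cons]
      rw [ih, head?_insertBy]
      cases acc with
      | nil => rfl
      | cons a t =>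
          congr 1
          simp only [List.head?_cons]
          split <;> rfl

-- head of Python's stable sort is min? (first extremal element)
theorem head?_sorted_eq_min? {α : Type} (l : List α) (key : α → Int) :
    (PySem.List.sorted l key false).head? = PySem.List.min? l key := by
  rw [PySem.List.sorted_eq_foldl_insertBy, head?_foldl_insertBy]
  simp only [List.head?_nil, PySem.List.min?]
  congr 1
  funext h x
  cases h <;> simp

-- the two per-pair bodies agree
theorem step_eq (output : List String) (p : String × List (String × Int)) :
    (let name := p.1
     let abbrdict := PySem.Dict.ofList p.2
     let output := output ++ [name]
     if abbrdict.size = 0 then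
       output ++ [" "]
     else
       let sorteddict := PySem.Dict.ofList (PySem.List.sorted abbrdict.items (fun x => x.2) false)
       let sortedkeys := sorteddict.keys
       output ++ [PySem.List.pyGetD sortedkeys 0 ""]) =
    (let name := p.1
     let abbrdict := PySem.Dict.ofList p.2
     let output := output ++ [name]
     let best := abbrdict.items.foldl
       (fun acc kv =>
         match acc with
         | none => some kv
         | some b => if kv.2 < b.2 then some kv else some b)
       (none : Option (String × Int))
     match best with
     | none => output ++ [" "]
     | some b => output ++ [b.1]) := by
  have hbest : (PySem.Dict.ofList p.2).items.foldl
      (fun acc kv =>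
        match acc with
        | none => some kv
        | some b => if kv.2 < b.2 then some kv else some b)
      (none : Option (String × Int)) =
      PySem.List.min? (PySem.Dict.ofList p.2).items (fun x => x.2) := by
    simp only [PySem.List.min?]
    congr 1
    funext h x
    cases h <;> rfl
  simp only [hbest]
  cases hit : (PySem.Dict.ofList p.2).items with
  | nil =>
      simp [PySem.Dict.size, hit, PySem.List.min?]
  | cons q rest =>
      have hsne : PySem.List.sorted (q :: rest) (fun x : String × Int => x.2) false ≠ [] := by
        simp [PySem.List.sorted_eq_nil_iff]
      obtain ⟨m, t, hs⟩ := List.exists_cons_of_ne_nil hsne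
      -- min? of the nonempty items list equals the head of the sorted list
      have hmin : PySem.List.min? (q :: rest) (fun x : String × Int => x.2) = some m := by
        rw [← head?_sorted_eq_min?, hs]; rfl
      -- the keys of the sorted items list are still without duplicates
      have hnd : ((PySem.List.sorted (q :: rest) (fun x : String × Int => x.2) false).map
          (fun a => a.1)).Nodup := by
        have h1 : (PySem.Dict.ofList p.2).keys.Nodup := PySem.Dict.nodup_keys_ofList p.2
        simp only [PySem.Dict.keys] at h1
        rw [hit] at h1
        have hperm := (PySem.List.sorted_perm (q :: rest) (fun x : String × Int => x.2) false).map
          (fun a : String × Int => a.1)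
        exact hperm.nodup_iff.mpr h1
      -- so re-wrapping the sorted items in a dict keeps exactly that list
      have hitems : (PySem.Dict.ofList (PySem.List.sorted (q :: rest)
          (fun x : String × Int => x.2) false)).items =
          PySem.List.sorted (q :: rest) (fun x : String × Int => x.2) false := by
        have := PySem.Dict.items_foldl_insert_fresh
          (PySem.List.sorted (q :: rest) (fun x : String × Int => x.2) false)
          (fun a : String × Int => a.1) (fun a => a.2) (PySem.Dict.empty)
          (by intro a _; simp [PySem.Dict.contains_empty]) hnd
        simpa [PySem.Dict.ofList, PySem.Dict.update, PySem.Dict.empty] using this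
      have hsize : (PySem.Dict.ofList p.2).size ≠ 0 := by
        simp [PySem.Dict.size, hit]
      simp only [hsize, PySem.Dict.keys]
      rw [hitems, hs, hmin]
      simp [PySem.List.pyGetD_zero]

-- ===== VERDICT (by name: the statement is the Claim_ definition above) =====
theorem formattedoutput_spec : Claim_equal_formattedoutput := by
  intro tempabbrs _
  unfold Spec_formattedoutput formattedoutput formattedoutput_alt
  exact congrFun (congrFun (congrArg List.foldl (funext fun o => funext fun p => step_eq o p)) []) tempabbrs
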